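-- pv_equiv track=rewrite | github.com/stranske/Trend_Model_Project | src/trend_analysis/multi_period/loaders.py | detect_index_columns
-- ===== SOURCE A (Python) =====
-- _INDEX_HINTS = (
--     "SPX",
--     "S&P",
--     "SP500",
--     "SP-500",
--     "SP_500",
--     "TSX",
--     "NDX",
--     "NASDAQ",
--     "DOW",
--     "DJIA",
--     "AGG",
--     "BOND",
--     "FIXED",
--     "BENCH",
--     "BENCHMARK",
--     "IDX",
--     "INDEX",
--     "MSCI",
--     "RUSSELL",
--     "FTSE",
--     "STOXX",
--     "VIX",
--     "VOLATILITY",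
-- )
--
-- def detect_index_columns(columns: list[str]) -> list[str]:
--     """Detect likely index/benchmark columns from column names.
--
--     Scans column names for common index patterns (SPX, TSX, INDEX, etc.)
--     and returns a list of columns that appear to be market indices.
--
--     Parameters
--     ----------
--     columns:
--         List of column names from a DataFrame.
--
--     Returns
--     -------
--     list[str]
--         Column names that match index/benchmark patterns.
--     """
--     detected: list[str] = []
--     for col in columns:
--         upper = col.upper()
--         for hint in _INDEX_HINTS:
--             if hint in upper:
--                 detected.append(col)
--                 break
--     return detected
-- ===== SOURCE B (Python) =====
-- _INDEX_HINTS = (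
--     "SPX", "S&P", "SP500", "SP-500", "SP_500", "TSX", "NDX", "NASDAQ",
--     "DOW", "DJIA", "AGG", "BOND", "FIXED", "BENCH", "BENCHMARK", "IDX",
--     "INDEX", "MSCI", "RUSSELL", "FTSE", "STOXX", "VIX", "VOLATILITY",
-- )
--
-- # One-time index: hints bucketed by their first character, so that at each
-- # position of a column name only the hints that can possibly start there are
-- # prefix-tested (position-major scan), instead of running a full substring
-- # search per hint.
-- _BY_FIRST: dict = {}
-- for _h in _INDEX_HINTS:
--     _BY_FIRST.setdefault(_h[0], []).append(_h)
--
--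
-- def _is_index_name(col):
--     u = col.upper()
--     for i in range(len(u)):
--         if any(u.startswith(h, i) for h in _BY_FIRST.get(u[i], ())):
--             return True
--     return False
--
--
-- def detect_index_columns(columns: list) -> list:
--     return [col for col in columns if _is_index_name(col)]
-- ===== Notes on version B (the rewrite author's own statement) =====
-- stated objective: alternative
-- what changed: B precomputes a dict bucketing the hints by first character and does one position-major scan per column (prefix-testing only the hints in the current character's bucket), instead of A's hint-major inner loop running a full substring search per hint.
import Mathlib
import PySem

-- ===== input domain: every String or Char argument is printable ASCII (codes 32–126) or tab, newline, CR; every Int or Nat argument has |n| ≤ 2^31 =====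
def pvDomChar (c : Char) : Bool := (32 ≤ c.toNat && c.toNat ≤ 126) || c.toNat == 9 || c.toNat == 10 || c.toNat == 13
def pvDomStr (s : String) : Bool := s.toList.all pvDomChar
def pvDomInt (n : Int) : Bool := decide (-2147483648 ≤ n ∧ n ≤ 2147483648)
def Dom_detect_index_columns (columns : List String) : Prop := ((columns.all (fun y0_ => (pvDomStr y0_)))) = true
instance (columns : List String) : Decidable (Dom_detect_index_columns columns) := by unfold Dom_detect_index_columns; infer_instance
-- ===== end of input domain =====

-- B replaces A's hint-major inner loop (a substring search per hint, with break) by a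
-- first-character bucket index over the hints and one position-major prefix scan per column;
-- objective: alternative (same result, different traversal and data structure).

-- ===== PORT A =====
-- the module constant _INDEX_HINTS
def INDEX_HINTS : List String :=
  ["SPX", "S&P", "SP500", "SP-500", "SP_500", "TSX", "NDX", "NASDAQ",
   "DOW", "DJIA", "AGG", "BOND", "FIXED", "BENCH", "BENCHMARK", "IDX",
   "INDEX", "MSCI", "RUSSELL", "FTSE", "STOXX", "VIX", "VOLATILITY"]

-- A's inner 'for hint in _INDEX_HINTS: if hint in upper: …; break' (break = stop at first hit)
def pvHintHit (upper : String) : List String → Bool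
  | [] => false
  | h :: rest => if PySem.Str.isIn h upper then true else pvHintHit upper rest

def detect_index_columns (columns : List String) : List String :=
  columns.foldl (fun detected col =>
    if pvHintHit (PySem.Str.upper col) INDEX_HINTS then detected ++ [col] else detected) []

-- ===== PORT B =====
-- the module-level '_BY_FIRST.setdefault(_h[0], []).append(_h)' loop; hints are kept as
-- char lists (the Str wrappers are thin over List Char, on which B's scan works);
-- 'h.toList.headD ...' is _h[0] (every hint is a nonempty literal, so the default is never read)
def pvByFirst : PySem.Dict Char (List (List Char)) :=
  (INDEX_HINTS.map (fun h => (h.toList.headD ' ', h.toList))).foldl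
    (fun d p => d.modify p.1 [] (· ++ [p.2])) PySem.Dict.empty

-- '_is_index_name': 'for i in range(len(u)): if any(u.startswith(h, i) for h in _BY_FIRST.get(u[i], ())): return True'
-- as structural recursion over the suffixes of u ('c :: rest' is u[i:], c is u[i])
def pvScan : List Char → Bool
  | [] => false
  | c :: rest =>
    ((PySem.Dict.getD pvByFirst c []).any (fun h => PySem.Chars.startswith (c :: rest) h))
      || pvScan rest

def detect_index_columns_alt (columns : List String) : List String :=
  columns.filter (fun col => pvScan (PySem.Chars.upper col.toList))

-- ===== PRECONDITION & SPEC =====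
def Spec_detect_index_columns (columns : List String) (out : List String) : Prop := out = detect_index_columns_alt columns
instance (columns : List String) (out : List String) : Decidable (Spec_detect_index_columns columns out) := by unfold Spec_detect_index_columns; infer_instance

-- ===== CLAIM (what is proved, stated in full; the proofs are below) =====
def Claim_equal_detect_index_columns : Prop := ∀ (columns : List String), Dom_detect_index_columns columns → Spec_detect_index_columns columns (detect_index_columns columns)

-- ===== LEMMAS AND PROOFS =====

-- A's break-loop is an 'any' over the hint list
theorem pvHintHit_eq_any (upper : String) (l : List String) :
    pvHintHit upper l = l.any (fun h => PySem.Str.isIn h upper) := by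
  induction l with
  | nil => rfl
  | cons h rest ih =>
    have step : pvHintHit upper (h :: rest)
        = if PySem.Str.isIn h upper then true else pvHintHit upper rest := rfl
    rw [step]
    cases hh : PySem.Str.isIn h upper
    · have hh' : PySem.Chars.isIn h.toList upper.toList = false := by simpa using hh
      simp [List.any_cons, hh', ih]
    · have hh' : PySem.Chars.isIn h.toList upper.toList = true := by simpa using hh
      simp [List.any_cons, hh']

-- 'sub in (c :: rest)' splits into a prefix test at the head position and 'sub in rest'
theorem isIn_cons (sub : List Char) (c : Char) (rest : List Char) :
    PySem.Chars.isIn sub (c :: rest)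
      = (PySem.Chars.startswith (c :: rest) sub || PySem.Chars.isIn sub rest) := by
  rcases hb : (PySem.Chars.startswith (c :: rest) sub || PySem.Chars.isIn sub rest) with _ | _
  · simp only [Bool.or_eq_false_iff] at hb
    rw [← Bool.not_eq_true, ← PySem.Chars.exists_prefix_drop_iff_isIn]
    rintro ⟨j, hj⟩
    cases j with
    | zero =>
      exact absurd ((PySem.Chars.startswith_iff _ _).2 hj) (by simp [hb.1])
    | succ j =>
      have : PySem.Chars.isIn sub rest = true :=
        (PySem.Chars.exists_prefix_drop_iff_isIn sub rest).1 ⟨j, by simpa using hj⟩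
      simp [this] at hb
  · rcases Bool.or_eq_true_iff.1 hb with h | h
    · exact (PySem.Chars.exists_prefix_drop_iff_isIn sub _).1
        ⟨0, by simpa using (PySem.Chars.startswith_iff _ _).1 h⟩
    · obtain ⟨j, hj⟩ := (PySem.Chars.exists_prefix_drop_iff_isIn sub rest).2 h
      exact (PySem.Chars.exists_prefix_drop_iff_isIn sub _).1 ⟨j + 1, by simpa using hj⟩

-- dropping the entries whose key differs from c loses no prefix match at a position whose
-- character is c, provided every entry's value starts with its key
theorem filter_any_startswith (c : Char) (rest : List Char) (L : List (Char × List Char))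
    (hL : ∀ p ∈ L, p.2.head? = some p.1) :
    ((L.filter (fun p => p.1 == c)).map (fun p => p.2)).any
        (fun h => PySem.Chars.startswith (c :: rest) h)
      = (L.map (fun p => p.2)).any (fun h => PySem.Chars.startswith (c :: rest) h) := by
  induction L with
  | nil => rfl
  | cons p L ih =>
    have hhead := hL p (List.mem_cons_self)
    have ih' := ih (fun q hq => hL q (List.mem_cons_of_mem p hq))
    rcases p with ⟨k, v⟩
    rcases v with _ | ⟨v0, vt⟩
    · simp at hhead
    · have hv0 : v0 = k := by simpa using hhead
      subst hv0
      by_cases hk : v0 = c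
      · subst hk
        simp [List.any_cons, ih']
      · have hsw : PySem.Chars.startswith (c :: rest) (v0 :: vt) = false := by
          simp [PySem.Chars.startswith, List.isPrefixOf, hk]
        simp [hk, List.any_cons, hsw, ih']

-- the bucket of c holds exactly the hints keyed c, so scanning it equals scanning all hints
theorem bucket_eq (c : Char) (rest : List Char) :
    (PySem.Dict.getD pvByFirst c []).any (fun h => PySem.Chars.startswith (c :: rest) h)
      = INDEX_HINTS.any (fun h => PySem.Chars.startswith (c :: rest) h.toList) := by
  have hget : PySem.Dict.getD pvByFirst c []
      = ((INDEX_HINTS.map (fun h => (h.toList.headD ' ', h.toList))).filter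
          (fun p => p.1 == c)).map (fun p => p.2) := by
    unfold pvByFirst
    rw [PySem.Dict.getD_foldl_modify_append, PySem.Dict.getD_empty]
    simp
  rw [hget, filter_any_startswith c rest _ (by decide)]
  rw [List.any_map, List.any_map]
  exact PySem.List.any_congr_mem (fun h _ => rfl)

-- per-column equivalence of the two match tests, on the char-list side
theorem scan_eq_any (u : List Char) :
    pvScan u = INDEX_HINTS.any (fun h => PySem.Chars.isIn h.toList u) := by
  induction u with
  | nil => decide
  | cons c rest ih =>
    simp only [pvScan, ih, bucket_eq c rest]
    rw [PySem.List.any_congr_mem (l := INDEX_HINTS)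
        (f := fun h => PySem.Chars.isIn h.toList (c :: rest))
        (g := fun h =>
          (PySem.Chars.startswith (c :: rest) h.toList || PySem.Chars.isIn h.toList rest))
        (fun h _ => isIn_cons h.toList c rest)]
    induction INDEX_HINTS with
    | nil => rfl
    | cons x xs ihx =>
      simp only [List.any_cons, ← ihx]
      cases PySem.Chars.startswith (c :: rest) x.toList <;>
        cases PySem.Chars.isIn x.toList rest <;> simp

-- ===== VERDICT (by name: the statement is the Claim_ definition above) =====
theorem detect_index_columns_spec : Claim_equal_detect_index_columns := by
  intro columns _
  unfold Spec_detect_index_columns detect_index_columns detect_index_columns_alt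
  rw [PySem.List.foldl_append_if_eq_filter]
  simp only [List.nil_append]
  apply List.filter_congr
  intro col _
  rw [pvHintHit_eq_any, scan_eq_any]
  simp [PySem.Str.isIn_eq, PySem.Str.toList_upper]
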